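-- pv_equiv track=rewrite | github.com/Shashank0403/Charger-uptime | station_uptime.py | calculate_uptime
-- ===== SOURCE A (Python) =====
-- def calculate_uptime(stations, charger_availability):
--     station_uptime = {}
--
--     for station_id, charger_ids in stations.items():
--         total_time = 0
--         up_time = 0
--
--         for charger_id in charger_ids:
--             if charger_id not in charger_availability:
--                 continue
--
--             reports = charger_availability[charger_id]
--             reports.sort()  # Sort by start time
--
--             last_end_time = None
--             for start_time, end_time, up in reports:
--                 if last_end_time is not None and start_time > last_end_time:
--                     total_time += start_time - last_end_time
--
--                 total_time += end_time - start_time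
--                 if up:
--                     up_time += end_time - start_time
--
--                 last_end_time = max(last_end_time or 0, end_time)
--
--         if total_time > 0:
--             station_uptime[station_id] = (up_time * 100) // total_time
--         else:
--             station_uptime[station_id] = 0
--
--     return station_uptime
-- ===== SOURCE B (Python) =====
-- def calculate_uptime(stations, charger_availability):
--     # Staged/functional decomposition: per-charger (total, up) pairs computed once
--     # via running-max prefix + comprehensions, then dict comprehensions over stations.
--     # Like A, sorts report lists in place (A sorts only the referenced ones).
--     contrib = {cid: _contribution(rs) for cid, rs in charger_availability.items()}
--     return {sid: _station_pct([contrib[c] for c in cids if c in contrib])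
--             for sid, cids in stations.items()}
--
--
-- def _station_pct(pairs):
--     total = sum(t for t, _ in pairs)
--     up = sum(u for _, u in pairs)
--     return (up * 100) // total if total > 0 else 0
--
--
-- def _contribution(reports):
--     reports.sort()
--     prefix = []
--     m = 0
--     for _, e, _ in reports:
--         m = max(m, e)
--         prefix.append(m)
--     gaps = sum(s - p for (s, _, _), p in zip(reports[1:], prefix) if s > p)
--     total = gaps + sum(e - s for s, e, _ in reports)
--     up = sum(e - s for s, e, u in reports if u)
--     return total, up
-- ===== Notes on version B (the rewrite author's own statement) =====
-- stated objective: alternative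
-- what changed: B precomputes each charger's (total, up) once via a staged functional pipeline (sort, running-max prefix list, zip/comprehension sums) instead of A's single stateful scan repeated per occurrence, and builds the result with dict comprehensions instead of nested accumulator loops.
import Mathlib
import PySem

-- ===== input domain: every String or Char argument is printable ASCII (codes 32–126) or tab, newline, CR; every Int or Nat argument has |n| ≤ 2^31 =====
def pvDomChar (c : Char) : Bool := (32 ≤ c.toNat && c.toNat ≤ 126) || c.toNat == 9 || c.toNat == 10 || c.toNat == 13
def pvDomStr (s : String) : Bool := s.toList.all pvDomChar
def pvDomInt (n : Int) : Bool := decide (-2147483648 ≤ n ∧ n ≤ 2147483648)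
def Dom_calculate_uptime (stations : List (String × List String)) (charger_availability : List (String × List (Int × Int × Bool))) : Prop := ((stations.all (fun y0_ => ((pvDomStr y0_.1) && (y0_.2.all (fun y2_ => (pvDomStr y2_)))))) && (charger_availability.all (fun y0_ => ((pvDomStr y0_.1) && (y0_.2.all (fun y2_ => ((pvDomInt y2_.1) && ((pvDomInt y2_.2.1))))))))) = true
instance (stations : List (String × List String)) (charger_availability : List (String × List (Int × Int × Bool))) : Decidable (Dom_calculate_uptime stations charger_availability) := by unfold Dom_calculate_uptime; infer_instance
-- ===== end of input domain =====

-- B replaces A's repeated stateful per-occurrence scan by a staged functional pipeline: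
-- each charger's (total, up) pair is computed once (sort, running-max prefix list,
-- zip/filter/sum comprehensions) and the result is built by dict comprehensions
-- (objective: alternative decomposition). Both Pythons sort report lists in place
-- (A only the referenced ones); the equivalence proved here is about the RETURN value
-- only (re-sorting a sorted list is a no-op, so repeated accesses read the same value).

-- ===== PORT A =====
-- Port of Python's list.sort() on (int, int, bool) triples: a stable sort with the
-- lexicographic tuple order (False < True); exact via PySem.List.insertBy
-- (cf. PySem.List.sorted_eq_foldl_insertBy: this foldl/insertBy IS Python's stable sort).
def pvLexLt (a b : Int × Int × Bool) : Bool :=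
  a.1 < b.1 || (a.1 == b.1 && (a.2.1 < b.2.1 || (a.2.1 == b.2.1 && (!a.2.2 && b.2.2))))

def pvSortReports (rs : List (Int × Int × Bool)) : List (Int × Int × Bool) :=
  rs.foldl (fun acc x => PySem.List.insertBy pvLexLt x acc) []

-- A's inner report loop with its mutable state (total, up, last_end_time);
-- `last_end_time or 0` is `lastEnd.getD 0` exactly (None ↦ 0, and 0 is falsy ↦ 0 too).
def pvScan : List (Int × Int × Bool) → Int → Int → Option Int → Int × Int
  | [], total, up, _ => (total, up)
  | (s, e, u) :: rest, total, up, lastEnd =>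
      let total1 := match lastEnd with
        | some l => if l < s then total + (s - l) else total
        | none => total
      pvScan rest (total1 + (e - s)) (if u then up + (e - s) else up)
        (some (max (lastEnd.getD 0) e))

-- A's in-place `reports.sort()` is modelled by sorting at each access: it changes only
-- the stored order, and re-sorting an already sorted list returns the same list,
-- so every access reads the same sorted value; the return value is unaffected.
def calculate_uptime (stations : List (String × List String)) (charger_availability : List (String × List (Int × Int × Bool))) : List (String × Int) :=
  (stations.foldl (fun (d : PySem.Dict String Int) p =>
      let acc := p.2.foldl (fun (acc : Int × Int) cid =>
          match (PySem.Dict.mk charger_availability).get? cid with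
          | none => acc      -- `charger_id not in charger_availability: continue`
          | some reports => pvScan (pvSortReports reports) acc.1 acc.2 none)
        (0, 0)
      d.insert p.1 (if 0 < acc.1 then PySem.Int.floordiv (acc.2 * 100) acc.1 else 0))
    PySem.Dict.empty).items

-- ===== PORT B =====
-- the `prefix`-building loop: foldl carrying (prefix-so-far, m), `m = max(m, e)`, append
def pvRunMaxPrefix (reports : List (Int × Int × Bool)) : List Int :=
  (reports.foldl (fun (p : List Int × Int) r =>
      (p.1 ++ [max p.2 r.2.1], max p.2 r.2.1)) ([], 0)).1

-- _contribution: sort, running-max prefix, then three comprehension sums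
def pvContribution (reports0 : List (Int × Int × Bool)) : Int × Int :=
  let reports := pvSortReports reports0
  let pre := pvRunMaxPrefix reports
  let gaps := ((((reports.drop 1).zip pre).filter (fun q => q.2 < q.1.1)).map
      (fun q => q.1.1 - q.2)).sum
  let total := gaps + (reports.map (fun r => r.2.1 - r.1)).sum
  let up := ((reports.filter (fun r => r.2.2)).map (fun r => r.2.1 - r.1)).sum
  (total, up)

-- _station_pct over the comprehension `[contrib[c] for c in cids if c in contrib]`
def pvStationPct (pairs : List (Int × Int)) : Int :=
  let total := (pairs.map Prod.fst).sum
  let up := (pairs.map Prod.snd).sum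
  if 0 < total then PySem.Int.floordiv (up * 100) total else 0

def calculate_uptime_alt (stations : List (String × List String)) (charger_availability : List (String × List (Int × Int × Bool))) : List (String × Int) :=
  let contrib := charger_availability.foldl
      (fun (d : PySem.Dict String (Int × Int)) p => d.insert p.1 (pvContribution p.2))
      PySem.Dict.empty
  stations.map (fun p => (p.1, pvStationPct (p.2.filterMap (fun c => contrib.get? c))))

-- ===== PRECONDITION & SPEC =====
-- Pre_ excludes only association lists with duplicate station or charger ids: both
-- arguments are Python dicts, which cannot hold duplicate keys, so such lists represent
-- no Python input at all (A's dict overwrite/first-match vs B's comprehension order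
-- could differ only there).
def Pre_calculate_uptime (stations : List (String × List String)) (charger_availability : List (String × List (Int × Int × Bool))) : Prop :=
  (stations.map Prod.fst).Nodup ∧ (charger_availability.map Prod.fst).Nodup
instance (stations : List (String × List String)) (charger_availability : List (String × List (Int × Int × Bool))) : Decidable (Pre_calculate_uptime stations charger_availability) := by unfold Pre_calculate_uptime; infer_instance

def pvWitness_calculate_uptime : (List (String × List String)) × (List (String × List (Int × Int × Bool))) :=
  ([("s1", ["c1", "c2"]), ("s2", ["c1"])], [("c1", [(0, 10, true), (5, 20, false)]), ("c2", [(0, 4, true)])])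

def Spec_calculate_uptime (stations : List (String × List String)) (charger_availability : List (String × List (Int × Int × Bool))) (out : List (String × Int)) : Prop := out = calculate_uptime_alt stations charger_availability
instance (stations : List (String × List String)) (charger_availability : List (String × List (Int × Int × Bool))) (out : List (String × Int)) : Decidable (Spec_calculate_uptime stations charger_availability out) := by unfold Spec_calculate_uptime; infer_instance

-- ===== CLAIM (what is proved, stated in full; the proofs are below) =====
def Claim_equal_calculate_uptime : Prop := ∀ (stations : List (String × List String)) (charger_availability : List (String × List (Int × Int × Bool))), Dom_calculate_uptime stations charger_availability → Pre_calculate_uptime stations charger_availability → Spec_calculate_uptime stations charger_availability (calculate_uptime stations charger_availability)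

-- ===== LEMMAS AND PROOFS =====

-- running maxima of the ends, seeded with m (characterises B's prefix list)
def pvRunMaxL (m : Int) : List (Int × Int × Bool) → List Int
  | [] => []
  | r :: rs => max m r.2.1 :: pvRunMaxL (max m r.2.1) rs

-- the gap sum with current running maximum m (characterises A's last_end_time gaps)
def pvGapsFrom (m : Int) : List (Int × Int × Bool) → Int
  | [] => 0
  | (s, e, _) :: rs => (if m < s then s - m else 0) + pvGapsFrom (max m e) rs

lemma foldl_runmax : ∀ (rs : List (Int × Int × Bool)) (l : List Int) (m : Int),
    (rs.foldl (fun (p : List Int × Int) r => (p.1 ++ [max p.2 r.2.1], max p.2 r.2.1)) (l, m)).1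
      = l ++ pvRunMaxL m rs
  | [], l, m => by simp [pvRunMaxL]
  | r :: rs, l, m => by
      simp only [List.foldl_cons, pvRunMaxL]
      rw [foldl_runmax rs (l ++ [max m r.2.1]) (max m r.2.1)]
      simp

lemma gaps_zip : ∀ (rs : List (Int × Int × Bool)) (m : Int),
    (((rs.zip (m :: pvRunMaxL m rs)).filter (fun q => q.2 < q.1.1)).map
        (fun q => q.1.1 - q.2)).sum = pvGapsFrom m rs
  | [], m => by simp [pvGapsFrom]
  | (s, e, u) :: rs, m => by
      simp only [pvRunMaxL, pvGapsFrom, List.zip_cons_cons, List.filter_cons]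
      rw [← gaps_zip rs (max m e)]
      by_cases h : m < s <;> simp [h]

-- the scan is the gap sum + duration sum / up-duration sum, from any state
lemma pvScan_some : ∀ (rs : List (Int × Int × Bool)) (t u m : Int),
    pvScan rs t u (some m)
      = (t + pvGapsFrom m rs + (rs.map (fun r => r.2.1 - r.1)).sum,
         u + ((rs.filter (fun r => r.2.2)).map (fun r => r.2.1 - r.1)).sum)
  | [], t, u, m => by simp [pvScan, pvGapsFrom]
  | (s, e, b) :: rs, t, u, m => by
      simp only [pvScan, pvGapsFrom, Option.getD_some, List.map_cons, List.sum_cons,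
        List.filter_cons]
      rw [pvScan_some rs _ _ (max m e)]
      apply Prod.ext <;> cases b <;> by_cases h : m < s <;> simp [h] <;> ring

-- the scan is affine in its two accumulators
lemma pvScan_shift (rs : List (Int × Int × Bool)) (t u : Int) :
    pvScan rs t u none = (t + (pvScan rs 0 0 none).1, u + (pvScan rs 0 0 none).2) := by
  cases rs with
  | nil => simp [pvScan]
  | cons r rest =>
      obtain ⟨s, e, b⟩ := r
      simp only [pvScan, Option.getD_none]
      rw [pvScan_some rest _ _ (max 0 e), pvScan_some rest _ _ (max 0 e)]
      apply Prod.ext <;> cases b <;> simp <;> ring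

-- A's scan of a charger's sorted reports IS B's _contribution of the raw reports
lemma scan_eq_contribution (rs0 : List (Int × Int × Bool)) :
    pvScan (pvSortReports rs0) 0 0 none = pvContribution rs0 := by
  unfold pvContribution pvRunMaxPrefix
  cases h : pvSortReports rs0 with
  | nil => simp [pvScan]
  | cons r rs =>
      obtain ⟨s, e, u⟩ := r
      simp only [pvScan, Option.getD_none, List.foldl_cons, List.drop_succ_cons,
        List.drop_zero, List.map_cons, List.sum_cons, List.filter_cons]
      rw [pvScan_some rs _ _ (max 0 e), foldl_runmax rs ([] ++ [max 0 e]) (max 0 e)]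
      simp only [List.nil_append, List.singleton_append, gaps_zip rs (max 0 e)]
      apply Prod.ext <;> cases u <;> simp <;> ring

-- on nodup keys, B's precomputed dict looks up exactly A's dict value, _contribution-mapped
lemma get?_contrib (ca : List (String × List (Int × Int × Bool))) (cid : String)
    (h : (ca.map Prod.fst).Nodup) :
    (ca.foldl (fun (d : PySem.Dict String (Int × Int)) p => d.insert p.1 (pvContribution p.2))
        PySem.Dict.empty).get? cid
      = ((PySem.Dict.mk ca).get? cid).map pvContribution := by
  suffices H : ∀ (l : List (String × List (Int × Int × Bool))) (d : PySem.Dict String (Int × Int)),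
      (l.map Prod.fst).Nodup →
      (l.foldl (fun d p => d.insert p.1 (pvContribution p.2)) d).get? cid
        = match (PySem.Dict.mk l).get? cid with
          | some r => some (pvContribution r)
          | none => d.get? cid by
    rw [H ca _ h]
    cases hg : (PySem.Dict.mk ca).get? cid <;> simp
  intro l
  induction l with
  | nil => intro d _; rfl
  | cons p rest ih =>
      intro d hnd
      simp only [List.map_cons, List.nodup_cons] at hnd
      simp only [List.foldl_cons]
      rw [ih _ hnd.2, PySem.Dict.get?_mk_cons]
      by_cases hc : p.1 = cid
      · subst hc
        have hrest : (PySem.Dict.mk rest).get? p.1 = none := by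
          rw [PySem.Dict.get?_eq_none_iff_not_mem_keys]
          simpa using hnd.1
        rw [hrest]
        simp [PySem.Dict.get?_insert_self]
      · simp only [beq_iff_eq, if_neg hc]
        cases hg : (PySem.Dict.mk rest).get? cid
        · rw [PySem.Dict.get?_insert]; simp [Ne.symm hc]
        · simp

-- an additive pair-fold over lookups is the pair of sums over the filterMap
lemma foldl_add_pairs (g : String → Option (Int × Int)) :
    ∀ (cids : List String) (a b : Int),
    cids.foldl (fun (acc : Int × Int) cid =>
        match g cid with
        | none => acc
        | some tu => (acc.1 + tu.1, acc.2 + tu.2)) (a, b)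
      = (a + ((cids.filterMap g).map Prod.fst).sum,
         b + ((cids.filterMap g).map Prod.snd).sum)
  | [], a, b => by simp
  | c :: cids, a, b => by
      simp only [List.foldl_cons, List.filterMap_cons]
      cases hg : g c with
      | none => simpa using foldl_add_pairs g cids a b
      | some tu =>
          simp only [List.map_cons, List.sum_cons]
          rw [foldl_add_pairs g cids (a + tu.1) (b + tu.2)]
          simp [add_assoc]

-- ===== VERDICT (by name: the statement is the Claim_ definition above) =====
theorem calculate_uptime_spec : Claim_equal_calculate_uptime := by
  intro stations ca _ hpre
  obtain ⟨hst, hca⟩ := hpre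
  unfold Spec_calculate_uptime calculate_uptime calculate_uptime_alt
  rw [PySem.Dict.items_foldl_insert_fresh _ _ _ _
    (by intro a _; exact PySem.Dict.contains_empty _) hst]
  simp only [PySem.Dict.empty, List.nil_append]
  apply List.map_congr_left
  intro p _
  have hinner : (fun (acc : Int × Int) (cid : String) =>
      match (PySem.Dict.mk ca).get? cid with
      | none => acc
      | some reports => pvScan (pvSortReports reports) acc.1 acc.2 none)
      = (fun (acc : Int × Int) (cid : String) =>
      match (ca.foldl (fun (d : PySem.Dict String (Int × Int)) p =>
          d.insert p.1 (pvContribution p.2)) PySem.Dict.empty).get? cid with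
      | none => acc
      | some tu => (acc.1 + tu.1, acc.2 + tu.2)) := by
    funext acc cid
    rw [get?_contrib ca cid hca]
    cases hg : (PySem.Dict.mk ca).get? cid with
    | none => rfl
    | some r =>
        simp only [Option.map_some]
        rw [pvScan_shift (pvSortReports r) acc.1 acc.2, scan_eq_contribution r]
  simp only [hinner, foldl_add_pairs, pvStationPct]
  simp [PySem.Dict.empty]
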